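-- pv_equiv track=rewrite | github.com/MinhNguyenR/AITEAM | agents/support/_api_transport.py | _parse_think_tags
-- ===== SOURCE A (Python) =====
-- def _parse_think_tags(text: str, in_think: bool) -> tuple[str, str, bool]:
--     """Split a stream chunk into (main_content, reasoning_content, new_in_think_state).
--
--     Handles <think>...</think> XML tags that DeepSeek R1 / Qwen3 models embed in content.
--     Tags may span multiple chunks; in_think tracks state across calls.
--     """
--     main: list[str] = []
--     think: list[str] = []
--     i = 0
--     while i < len(text):
--         if not in_think:
--             idx = text.find("<think>", i)
--             if idx == -1:
--                 main.append(text[i:])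
--                 break
--             main.append(text[i:idx])
--             in_think = True
--             i = idx + 7  # len("<think>")
--         else:
--             idx = text.find("</think>", i)
--             if idx == -1:
--                 think.append(text[i:])
--                 break
--             think.append(text[i:idx])
--             in_think = False
--             i = idx + 8  # len("</think>")
--     return "".join(main), "".join(think), in_think
-- ===== SOURCE B (Python) =====
-- def _parse_think_tags(text: str, in_think: bool) -> tuple[str, str, bool]:
--     """Tokenize once into plain segments and tag delimiters, then run a tiny
--     state machine over the tokens; unmatched delimiters stay literal text."""
--     tokens = []
--     i = seg = 0
--     n = len(text)
--     while i < n: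
--         if text.startswith("<think>", i):
--             tokens.append(text[seg:i])
--             tokens.append("<think>")
--             i += 7
--             seg = i
--         elif text.startswith("</think>", i):
--             tokens.append(text[seg:i])
--             tokens.append("</think>")
--             i += 8
--             seg = i
--         else:
--             i += 1
--     tokens.append(text[seg:])
--     main = []
--     think = []
--     for tok in tokens:
--         if tok == "<think>" and not in_think:
--             in_think = True
--         elif tok == "</think>" and in_think:
--             in_think = False
--         else:
--             (think if in_think else main).append(tok)
--     return "".join(main), "".join(think), in_think
-- ===== Notes on version B (the rewrite author's own statement) =====
-- stated objective: alternative
-- what changed: A alternately searches for the one tag relevant to the current state with str.find and slices; B first tokenizes the text once into plain segments and tag delimiters, then runs a state machine over the token list, letting unmatched delimiters fall through as literal text.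
import Mathlib
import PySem

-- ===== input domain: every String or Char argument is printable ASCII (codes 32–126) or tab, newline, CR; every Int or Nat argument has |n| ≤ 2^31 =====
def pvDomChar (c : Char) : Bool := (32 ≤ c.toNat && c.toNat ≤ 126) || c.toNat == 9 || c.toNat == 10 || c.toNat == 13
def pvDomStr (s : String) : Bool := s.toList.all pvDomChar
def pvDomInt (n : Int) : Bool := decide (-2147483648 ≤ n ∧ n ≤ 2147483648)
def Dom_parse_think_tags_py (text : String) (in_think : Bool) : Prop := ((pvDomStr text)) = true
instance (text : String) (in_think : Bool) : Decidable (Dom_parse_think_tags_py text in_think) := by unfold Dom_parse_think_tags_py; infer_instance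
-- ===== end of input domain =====

-- B tokenizes the chunk once into segments and tag delimiters and runs a state
-- machine over the tokens, instead of A's alternating str.find for the single
-- state-relevant tag; same return value (objective: alternative decomposition).

-- the two tag literals
def thinkOpen : List Char := ['<', 't', 'h', 'i', 'n', 'k', '>']
def thinkClose : List Char := ['<', '/', 't', 'h', 'i', 'n', 'k', '>']

-- ===== PORT A =====
-- text.find(tag, i) followed by the slices text[i:idx] / text[idx+len:]
-- is ported as splitFirst: the text before the first occurrence of tag,
-- and the text after that occurrence (none = find returned -1); exact for
-- the nonempty literal tags A searches for.
def splitFirst (tag : List Char) : List Char → Option (List Char × List Char)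
  | [] => none
  | c :: rest =>
    if tag.isPrefixOf (c :: rest) then some ([], (c :: rest).drop tag.length)
    else
      match splitFirst tag rest with
      | none => none
      | some (p, q) => some (c :: p, q)

theorem splitFirst_length_lt {tag : List Char} (htag : 0 < tag.length) :
    ∀ {cs p q : List Char}, splitFirst tag cs = some (p, q) → q.length < cs.length := by
  intro cs
  induction cs with
  | nil => intro p q h; simp [splitFirst] at h
  | cons c rest ih =>
    intro p q h
    simp only [splitFirst] at h
    split at h
    · cases h
      simp only [List.length_drop, List.length_cons]
      omega
    · cases hr : splitFirst tag rest with
      | none => rw [hr] at h; cases h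
      | some pq =>
        rw [hr] at h
        obtain ⟨p', q'⟩ := pq
        cases h
        have := ih hr
        simp only [List.length_cons]
        omega

-- A's while loop: in each state find the one relevant tag, flush the text
-- before it into the current bucket and flip the state; the loop becomes the
-- obvious recursion on the remaining suffix.
def goA (cs : List Char) (b : Bool) : List Char × List Char × Bool :=
  if b = false then
    match h : splitFirst thinkOpen cs with
    | none => (cs, [], false)
    | some (p, q) =>
      let r := goA q true
      (p ++ r.1, r.2.1, r.2.2)
  else
    match h : splitFirst thinkClose cs with
    | none => ([], cs, true)
    | some (p, q) =>
      let r := goA q false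
      (r.1, p ++ r.2.1, r.2.2)
termination_by cs.length
decreasing_by
  · exact splitFirst_length_lt (by decide) h
  · exact splitFirst_length_lt (by decide) h

def parse_think_tags_py (text : String) (in_think : Bool) : String × String × Bool :=
  let r := goA text.toList in_think
  (String.mk r.1, String.mk r.2.1, r.2.2)

-- ===== PORT B =====
-- B's tokenizer loop: scan forward one character at a time; at a tag, emit the
-- pending segment and the tag and jump past it (= findTag: segment before the
-- first tag, which tag, text after it).
def findTag : List Char → Option (List Char × Bool × List Char)
  | [] => none
  | c :: rest =>
    if thinkOpen.isPrefixOf (c :: rest) then some ([], true, (c :: rest).drop 7)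
    else if thinkClose.isPrefixOf (c :: rest) then some ([], false, (c :: rest).drop 8)
    else
      match findTag rest with
      | none => none
      | some (p, t, q) => some (c :: p, t, q)

theorem findTag_length_lt :
    ∀ {cs : List Char} {p : List Char} {t : Bool} {q : List Char},
      findTag cs = some (p, t, q) → q.length < cs.length := by
  intro cs
  induction cs with
  | nil => intro p t q h; simp [findTag] at h
  | cons c rest ih =>
    intro p t q h
    simp only [findTag] at h
    split at h
    · cases h; simp only [List.length_drop, List.length_cons]
      rename_i hpre
      have := List.IsPrefix.length_le (List.isPrefixOf_iff_prefix.mp hpre)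
      simp [thinkOpen] at this
      omega
    · split at h
      · cases h; simp only [List.length_drop, List.length_cons]
        rename_i hpre
        have := List.IsPrefix.length_le (List.isPrefixOf_iff_prefix.mp hpre)
        simp [thinkClose] at this
        omega
      · cases hr : findTag rest with
        | none => rw [hr] at h; cases h
        | some ptq =>
          rw [hr] at h
          obtain ⟨p', t', q'⟩ := ptq
          cases h
          have := ih hr
          simp only [List.length_cons]
          omega

-- tokens list: segments interleaved with the tag delimiters, in order
def tokenize (cs : List Char) : List (List Char) :=
  match h : findTag cs with
  | none => [cs]
  | some (p, t, q) => p :: (if t then thinkOpen else thinkClose) :: tokenize q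
termination_by cs.length
decreasing_by
  exact findTag_length_lt h

-- B's second loop: state machine over the tokens; matched tags flip the state,
-- everything else is appended to the bucket of the current state.
def foldToks : List (List Char) → Bool → List Char × List Char × Bool
  | [], b => ([], [], b)
  | tok :: ts, b =>
    if tok = thinkOpen ∧ b = false then foldToks ts true
    else if tok = thinkClose ∧ b = true then foldToks ts false
    else
      let r := foldToks ts b
      if b then (r.1, tok ++ r.2.1, r.2.2) else (tok ++ r.1, r.2.1, r.2.2)

def parse_think_tags_py_alt (text : String) (in_think : Bool) : String × String × Bool :=
  let r := foldToks (tokenize text.toList) in_think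
  (String.mk r.1, String.mk r.2.1, r.2.2)

-- ===== PRECONDITION & SPEC =====
def Spec_parse_think_tags_py (text : String) (in_think : Bool) (out : String × String × Bool) : Prop := out = parse_think_tags_py_alt text in_think
instance (text : String) (in_think : Bool) (out : String × String × Bool) : Decidable (Spec_parse_think_tags_py text in_think out) := by unfold Spec_parse_think_tags_py; infer_instance

-- ===== CLAIM (what is proved, stated in full; the proofs are below) =====
def Claim_equal_parse_think_tags_py : Prop := ∀ (text : String) (in_think : Bool), Dom_parse_think_tags_py text in_think → Spec_parse_think_tags_py text in_think (parse_think_tags_py text in_think)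


-- ===== LEMMAS AND PROOFS =====

-- unfolding lemmas for the WF-recursive definitions
theorem goA_false_none {cs : List Char} (h : splitFirst thinkOpen cs = none) :
    goA cs false = (cs, [], false) := by
  rw [goA]; split <;> ((try split) <;> simp_all)

theorem goA_false_some {cs p q : List Char} (h : splitFirst thinkOpen cs = some (p, q)) :
    goA cs false = (p ++ (goA q true).1, (goA q true).2.1, (goA q true).2.2) := by
  rw [goA]; split <;> ((try split) <;> simp_all)

theorem goA_true_none {cs : List Char} (h : splitFirst thinkClose cs = none) :
    goA cs true = ([], cs, true) := by
  rw [goA]; split <;> ((try split) <;> simp_all)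

theorem goA_true_some {cs p q : List Char} (h : splitFirst thinkClose cs = some (p, q)) :
    goA cs true = ((goA q false).1, p ++ (goA q false).2.1, (goA q false).2.2) := by
  rw [goA]; split <;> ((try split) <;> simp_all)

theorem tokenize_none {cs : List Char} (h : findTag cs = none) : tokenize cs = [cs] := by
  rw [tokenize]; split <;> simp_all

theorem tokenize_some {cs p q : List Char} {t : Bool} (h : findTag cs = some (p, t, q)) :
    tokenize cs = p :: (if t then thinkOpen else thinkClose) :: tokenize q := by
  rw [tokenize]; split <;> simp_all

-- reductions of B's token state machine
theorem foldToks_seg_false {p : List Char} (hpO : p ≠ thinkOpen) (hpC : p ≠ thinkClose)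
    (ts : List (List Char)) :
    foldToks (p :: ts) false =
      (p ++ (foldToks ts false).1, (foldToks ts false).2.1, (foldToks ts false).2.2) := by
  simp [foldToks, hpO, hpC]

theorem foldToks_seg_true {p : List Char} (hpO : p ≠ thinkOpen) (hpC : p ≠ thinkClose)
    (ts : List (List Char)) :
    foldToks (p :: ts) true =
      ((foldToks ts true).1, p ++ (foldToks ts true).2.1, (foldToks ts true).2.2) := by
  simp [foldToks, hpO, hpC]

theorem foldToks_open_false (ts : List (List Char)) :
    foldToks (thinkOpen :: ts) false = foldToks ts true := by
  simp [foldToks]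

theorem foldToks_open_true (ts : List (List Char)) :
    foldToks (thinkOpen :: ts) true =
      ((foldToks ts true).1, thinkOpen ++ (foldToks ts true).2.1, (foldToks ts true).2.2) := by
  have h : thinkOpen ≠ thinkClose := by decide
  simp [foldToks, h]

theorem foldToks_close_true (ts : List (List Char)) :
    foldToks (thinkClose :: ts) true = foldToks ts false := by
  have h : thinkClose ≠ thinkOpen := by decide
  simp [foldToks, h]

theorem foldToks_close_false (ts : List (List Char)) :
    foldToks (thinkClose :: ts) false =
      (thinkClose ++ (foldToks ts false).1, (foldToks ts false).2.1, (foldToks ts false).2.2) := by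
  have h : thinkClose ≠ thinkOpen := by decide
  simp [foldToks, h]

-- when the tokenizer finds no tag, neither of A's finds does
theorem findTag_none_split : ∀ {cs : List Char}, findTag cs = none →
    splitFirst thinkOpen cs = none ∧ splitFirst thinkClose cs = none := by
  intro cs
  induction cs with
  | nil => intro _; exact ⟨rfl, rfl⟩
  | cons c rest ih =>
    intro h
    simp only [findTag] at h
    split at h
    · cases h
    · split at h
      · cases h
      · rename_i hO hC
        cases hr : findTag rest with
        | none =>
          obtain ⟨h1, h2⟩ := ih hr
          constructor <;> simp [splitFirst, hO, hC, h1, h2]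
        | some ptq => rw [hr] at h; obtain ⟨p, t, q⟩ := ptq; cases h

theorem isPrefixOf_decomp {tag cs : List Char} (h : tag.isPrefixOf cs = true) :
    cs = tag ++ cs.drop tag.length := by
  obtain ⟨r, rfl⟩ := List.isPrefixOf_iff_prefix.mp h
  simp

theorem splitFirst_open_self (q : List Char) :
    splitFirst thinkOpen (thinkOpen ++ q) = some ([], q) := by
  simp [thinkOpen, splitFirst, List.isPrefixOf]

theorem splitFirst_close_self (q : List Char) :
    splitFirst thinkClose (thinkClose ++ q) = some ([], q) := by
  simp [thinkClose, splitFirst, List.isPrefixOf]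

-- the tokenizer really decomposes the text
theorem findTag_decomp : ∀ {cs p q : List Char} {t : Bool}, findTag cs = some (p, t, q) →
    cs = p ++ (if t then thinkOpen else thinkClose) ++ q := by
  intro cs
  induction cs with
  | nil => intro p q t h; cases h
  | cons c rest ih =>
    intro p q t h
    simp only [findTag] at h
    split at h
    · rename_i hO
      cases h
      simpa [thinkOpen] using isPrefixOf_decomp hO
    · split at h
      · rename_i hC
        cases h
        simpa [thinkClose] using isPrefixOf_decomp hC
      · cases hr : findTag rest with
        | none => rw [hr] at h; cases h
        | some ptq =>
          rw [hr] at h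
          obtain ⟨p', t', q'⟩ := ptq
          cases h
          simpa using ih hr

-- the segment before the first tag is never itself a tag
theorem findTag_seg_ne : ∀ {cs p q : List Char} {t : Bool}, findTag cs = some (p, t, q) →
    p ≠ thinkOpen ∧ p ≠ thinkClose := by
  intro cs
  induction cs with
  | nil => intro p q t h; cases h
  | cons c rest ih =>
    intro p q t h
    simp only [findTag] at h
    split at h
    · cases h; constructor <;> simp [thinkOpen, thinkClose]
    · split at h
      · cases h; constructor <;> simp [thinkOpen, thinkClose]
      · rename_i hO hC
        cases hr : findTag rest with
        | none => rw [hr] at h; cases h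
        | some ptq =>
          rw [hr] at h
          obtain ⟨p', t', q'⟩ := ptq
          cases h
          have hdec := findTag_decomp hr
          have hcs : c :: rest = (c :: p') ++ ((if t then thinkOpen else thinkClose) ++ q) := by
            rw [hdec]; simp
          refine ⟨fun he => hO ?_, fun he => hC ?_⟩
          · rw [List.isPrefixOf_iff_prefix]; exact he ▸ ⟨_, hcs.symm⟩
          · rw [List.isPrefixOf_iff_prefix]; exact he ▸ ⟨_, hcs.symm⟩

-- when the first tag is the one A is looking for, A's find sees exactly it
theorem findTag_open_split : ∀ {cs p q : List Char}, findTag cs = some (p, true, q) →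
    splitFirst thinkOpen cs = some (p, q) := by
  intro cs
  induction cs with
  | nil => intro p q h; cases h
  | cons c rest ih =>
    intro p q h
    simp only [findTag] at h
    split at h
    · rename_i hO
      cases h
      have hd := isPrefixOf_decomp hO
      conv_lhs => rw [hd]
      rw [splitFirst_open_self]
      simp [thinkOpen]
    · split at h
      · cases h
      · rename_i hO hC
        cases hr : findTag rest with
        | none => rw [hr] at h; cases h
        | some ptq =>
          rw [hr] at h
          obtain ⟨p', t', q'⟩ := ptq
          cases h
          simp [splitFirst, hO, ih hr]

theorem findTag_close_split : ∀ {cs p q : List Char}, findTag cs = some (p, false, q) →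
    splitFirst thinkClose cs = some (p, q) := by
  intro cs
  induction cs with
  | nil => intro p q h; cases h
  | cons c rest ih =>
    intro p q h
    simp only [findTag] at h
    split at h
    · cases h
    · split at h
      · rename_i hO hC
        cases h
        have hd := isPrefixOf_decomp hC
        conv_lhs => rw [hd]
        rw [splitFirst_close_self]
        simp [thinkClose]
      · rename_i hO hC
        cases hr : findTag rest with
        | none => rw [hr] at h; cases h
        | some ptq =>
          rw [hr] at h
          obtain ⟨p', t', q'⟩ := ptq
          cases h
          simp [splitFirst, hC, ih hr]

-- crossing an unmatched close tag: the first open tag lies beyond it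
theorem splitFirst_open_across (q : List Char) :
    splitFirst thinkOpen (thinkClose ++ q) =
      (splitFirst thinkOpen q).map (fun r => (thinkClose ++ r.1, r.2)) := by
  simp only [thinkOpen, thinkClose] at *
  cases h : splitFirst ['<', 't', 'h', 'i', 'n', 'k', '>'] q with
  | none => simp [splitFirst, List.isPrefixOf, h]
  | some r => obtain ⟨p, q'⟩ := r; simp [splitFirst, List.isPrefixOf, h]

theorem splitFirst_close_across (q : List Char) :
    splitFirst thinkClose (thinkOpen ++ q) =
      (splitFirst thinkClose q).map (fun r => (thinkOpen ++ r.1, r.2)) := by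
  simp only [thinkOpen, thinkClose] at *
  cases h : splitFirst ['<', '/', 't', 'h', 'i', 'n', 'k', '>'] q with
  | none => simp [splitFirst, List.isPrefixOf, h]
  | some r => obtain ⟨p, q'⟩ := r; simp [splitFirst, List.isPrefixOf, h]

theorem findTag_close_openSplit : ∀ {cs p q : List Char}, findTag cs = some (p, false, q) →
    splitFirst thinkOpen cs =
      (splitFirst thinkOpen q).map (fun r => (p ++ thinkClose ++ r.1, r.2)) := by
  intro cs
  induction cs with
  | nil => intro p q h; cases h
  | cons c rest ih =>
    intro p q h
    simp only [findTag] at h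
    split at h
    · cases h
    · split at h
      · rename_i hO hC
        cases h
        have hd := isPrefixOf_decomp hC
        conv_lhs => rw [hd]
        rw [show thinkClose.length = 8 from rfl, splitFirst_open_across]
        cases hq : splitFirst thinkOpen ((c :: rest).drop 8) <;> simp
      · rename_i hO hC
        cases hr : findTag rest with
        | none => rw [hr] at h; cases h
        | some ptq =>
          rw [hr] at h
          obtain ⟨p', t', q'⟩ := ptq
          cases h
          have := ih hr
          cases hq : splitFirst thinkOpen q with
          | none => simp [splitFirst, hO, this, hq]
          | some r => obtain ⟨a, b⟩ := r; simp [splitFirst, hO, this, hq]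

theorem findTag_open_closeSplit : ∀ {cs p q : List Char}, findTag cs = some (p, true, q) →
    splitFirst thinkClose cs =
      (splitFirst thinkClose q).map (fun r => (p ++ thinkOpen ++ r.1, r.2)) := by
  intro cs
  induction cs with
  | nil => intro p q h; cases h
  | cons c rest ih =>
    intro p q h
    simp only [findTag] at h
    split at h
    · rename_i hO
      cases h
      have hd := isPrefixOf_decomp hO
      conv_lhs => rw [hd]
      rw [show thinkOpen.length = 7 from rfl, splitFirst_close_across]
      cases hq : splitFirst thinkClose ((c :: rest).drop 7) <;> simp
    · split at h
      · cases h
      · rename_i hO hC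
        cases hr : findTag rest with
        | none => rw [hr] at h; cases h
        | some ptq =>
          rw [hr] at h
          obtain ⟨p', t', q'⟩ := ptq
          cases h
          have := ih hr
          cases hq : splitFirst thinkClose q with
          | none => simp [splitFirst, hC, this, hq]
          | some r => obtain ⟨a, b⟩ := r; simp [splitFirst, hC, this, hq]

theorem main_lemma : ∀ (n : Nat) (cs : List Char) (b : Bool), cs.length ≤ n →
    goA cs b = foldToks (tokenize cs) b := by
  intro n
  induction n with
  | zero =>
    intro cs b hlen
    have : cs = [] := List.eq_nil_of_length_eq_zero (Nat.le_zero.mp hlen)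
    subst this
    cases b with
    | false => rw [goA_false_none rfl, tokenize_none rfl]; simp [foldToks, thinkOpen]
    | true => rw [goA_true_none rfl, tokenize_none rfl]; simp [foldToks, thinkClose, thinkOpen]
  | succ n ih =>
    intro cs b hlen
    cases hf : findTag cs with
    | none =>
      rw [tokenize_none hf]
      obtain ⟨hO, hC⟩ := findTag_none_split hf
      have hcsO : cs ≠ thinkOpen := by
        intro he; subst he; exact absurd hO (by decide)
      have hcsC : cs ≠ thinkClose := by
        intro he; subst he; exact absurd hC (by decide)
      cases b with
      | false => rw [goA_false_none hO, foldToks_seg_false hcsO hcsC]; simp [foldToks]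
      | true => rw [goA_true_none hC, foldToks_seg_true hcsO hcsC]; simp [foldToks]
    | some ptq =>
      obtain ⟨p, t, q⟩ := ptq
      have hqlen : q.length ≤ n := by
        have := findTag_length_lt hf; omega
      have ihq : ∀ b, goA q b = foldToks (tokenize q) b := fun b => ih q b hqlen
      obtain ⟨hpO, hpC⟩ := findTag_seg_ne hf
      cases t with
      | true =>
        have htok : tokenize cs = p :: thinkOpen :: tokenize q := by rw [tokenize_some hf]; simp
        cases b with
        | false =>
          rw [htok, foldToks_seg_false hpO hpC, foldToks_open_false, ← ihq,
            goA_false_some (findTag_open_split hf)]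
        | true =>
          rw [htok, foldToks_seg_true hpO hpC, foldToks_open_true, ← ihq]
          have hsp := findTag_open_closeSplit hf
          cases hq : splitFirst thinkClose q with
          | none =>
            rw [hq] at hsp; simp only [Option.map_none] at hsp
            have hd : cs = p ++ thinkOpen ++ q := by simpa using findTag_decomp hf
            rw [goA_true_none hsp, goA_true_none hq, hd]
            simp
          | some r =>
            obtain ⟨p2, q2⟩ := r
            rw [hq] at hsp; simp only [Option.map_some] at hsp
            rw [goA_true_some hsp, goA_true_some hq]
            simp
      | false =>
        have htok : tokenize cs = p :: thinkClose :: tokenize q := by rw [tokenize_some hf]; simp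
        cases b with
        | true =>
          rw [htok, foldToks_seg_true hpO hpC, foldToks_close_true, ← ihq,
            goA_true_some (findTag_close_split hf)]
        | false =>
          rw [htok, foldToks_seg_false hpO hpC, foldToks_close_false, ← ihq]
          have hsp := findTag_close_openSplit hf
          cases hq : splitFirst thinkOpen q with
          | none =>
            rw [hq] at hsp; simp only [Option.map_none] at hsp
            have hd : cs = p ++ thinkClose ++ q := by simpa using findTag_decomp hf
            rw [goA_false_none hsp, goA_false_none hq, hd]
            simp
          | some r =>
            obtain ⟨p2, q2⟩ := r
            rw [hq] at hsp; simp only [Option.map_some] at hsp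
            rw [goA_false_some hsp, goA_false_some hq]
            simp

-- ===== VERDICT (by name: the statement is the Claim_ definition above) =====
theorem parse_think_tags_py_spec : Claim_equal_parse_think_tags_py := by
  intro text in_think _
  unfold Spec_parse_think_tags_py parse_think_tags_py parse_think_tags_py_alt
  rw [main_lemma text.toList.length text.toList in_think le_rfl]
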